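-- pv_equiv track=rewrite | github.com/AhmedElKhawlani/alx-interview | 0x04-utf8_validation/0-validate_utf8.py | validUTF8
-- ===== SOURCE A (Python) =====
-- def retrieve_leading_set_bits(num):
--     """
--     Function that returns the number of leading set bits
--     This function can be used in validUTF8(data)
--     """
--     leading_set_bits_count = 0
--     mask = 1 << 7
--     while mask & num:
--         leading_set_bits_count += 1
--         mask >>= 1
--     return leading_set_bits_count
--
-- def validUTF8(data):
--     """
--     Function that that determines if a given data set
--     represents a valid UTF-8 encoding
--     """
--     bits_count = 0
--     for i in range(len(data)):
--         if bits_count == 0: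
--             bits_count = retrieve_leading_set_bits(data[i])
--             if bits_count == 0:
--                 continue
--             if bits_count == 1 or bits_count > 4:
--                 return False
--         else:
--             if not (data[i] & (1 << 7) and not (data[i] & (1 << 6))):
--                 return False
--         bits_count -= 1
--     return bits_count == 0
-- ===== SOURCE B (Python) =====
-- def validUTF8(data):
--     """Valid UTF-8? Chunked parser: consume one whole character per step."""
--     i = 0
--     n = len(data)
--     while i < n:
--         b = data[i] & 0xFF
--         if b < 0x80:
--             size = 1
--         elif b < 0xC0:
--             return False
--         elif b < 0xE0:
--             size = 2
--         elif b < 0xF0: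
--             size = 3
--         elif b < 0xF8:
--             size = 4
--         else:
--             return False
--         if i + size > n:
--             return False
--         if any((c & 0xC0) != 0x80 for c in data[i + 1:i + size]):
--             return False
--         i += size
--     return True
-- ===== Notes on version B (the rewrite author's own statement) =====
-- stated objective: alternative
-- what changed: Replaced A's per-byte state machine (a running counter of expected continuation bytes, with a helper that counts leading set bits via a shift loop) by a chunked parser: an index loop that classifies the lead byte's low byte by numeric range, slices out the whole continuation run data[i+1:i+size], checks it in one any() pass, and jumps i forward a full character at a time.
import Mathlib
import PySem

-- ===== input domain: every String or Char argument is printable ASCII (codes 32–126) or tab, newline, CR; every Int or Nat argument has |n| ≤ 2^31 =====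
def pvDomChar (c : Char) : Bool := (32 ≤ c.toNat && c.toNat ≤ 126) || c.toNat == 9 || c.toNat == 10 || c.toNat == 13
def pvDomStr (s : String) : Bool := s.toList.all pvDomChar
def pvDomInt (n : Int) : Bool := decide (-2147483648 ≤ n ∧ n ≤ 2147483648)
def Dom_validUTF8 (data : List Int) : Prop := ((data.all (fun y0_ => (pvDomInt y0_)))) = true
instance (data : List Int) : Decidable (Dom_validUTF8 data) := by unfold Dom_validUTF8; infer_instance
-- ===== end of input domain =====

-- B replaces A's per-byte counter state machine by a chunked parser that consumes one
-- whole UTF-8 character (lead byte + its continuation slice) per step (objective: alternative).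

-- ===== PORT A =====
-- Python's `while mask & num: count += 1; mask >>= 1` starting at mask = 1 << 7:
-- after 8 halvings mask = 0 and `mask & num` is 0, so the loop runs at most 8 times;
-- fuel 8 therefore reproduces the loop exactly, iteration for iteration.
def pvLeadLoop (num : Int) : Nat → Nat → Int → Int
  | 0, _, c => c
  | fuel + 1, mask, c =>
    if Int.land ((mask : Nat) : Int) num ≠ 0 then pvLeadLoop num fuel (mask >>> 1) (c + 1)
    else c

def retrieveLeadingSetBits (num : Int) : Int := pvLeadLoop num 8 128 0  -- mask = 1 << 7

def validUTF8Go : List Int → Int → Bool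
  | [], bitsCount => decide (bitsCount = 0)
  | b :: rest, bitsCount =>
    if bitsCount = 0 then
      let c := retrieveLeadingSetBits b
      if c = 0 then validUTF8Go rest bitsCount          -- continue
      else if c = 1 ∨ 4 < c then false                  -- return False
      else validUTF8Go rest (c - 1)                     -- bits_count -= 1 at loop end
    else
      -- if not (data[i] & (1 << 7) and not (data[i] & (1 << 6))): return False
      if ¬(Int.land b 128 ≠ 0 ∧ Int.land b 64 = 0) then false
      else validUTF8Go rest (bitsCount - 1)

def validUTF8 (data : List Int) : Bool := validUTF8Go data 0

-- ===== PORT B =====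
-- Source B's `while i < n` index loop: one recursive step per loop iteration; the slice
-- data[i+1:i+size] is PySem.List.slice; data[i] with 0 ≤ i < n via pyGet? (always some here).
def validUTF8AltGo (data : List Int) (n : Nat) (i : Nat) : Bool :=
  if h : i < n then
    let b := Int.land ((PySem.List.pyGet? data ((i : Nat) : Int)).getD 0) 255
    if b < 128 then
      -- size = 1
      if n < i + 1 then false
      else if (PySem.List.slice data (some ((i + 1 : Nat) : Int)) (some ((i + 1 : Nat) : Int))).any
          (fun c => Int.land c 192 != 128) then false
      else validUTF8AltGo data n (i + 1)
    else if b < 192 then false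
    else if b < 224 then
      -- size = 2
      if n < i + 2 then false
      else if (PySem.List.slice data (some ((i + 1 : Nat) : Int)) (some ((i + 2 : Nat) : Int))).any
          (fun c => Int.land c 192 != 128) then false
      else validUTF8AltGo data n (i + 2)
    else if b < 240 then
      -- size = 3
      if n < i + 3 then false
      else if (PySem.List.slice data (some ((i + 1 : Nat) : Int)) (some ((i + 3 : Nat) : Int))).any
          (fun c => Int.land c 192 != 128) then false
      else validUTF8AltGo data n (i + 3)
    else if b < 248 then
      -- size = 4
      if n < i + 4 then false
      else if (PySem.List.slice data (some ((i + 1 : Nat) : Int)) (some ((i + 4 : Nat) : Int))).any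
          (fun c => Int.land c 192 != 128) then false
      else validUTF8AltGo data n (i + 4)
    else false
  else true
termination_by n - i
decreasing_by all_goals omega

def validUTF8_alt (data : List Int) : Bool := validUTF8AltGo data data.length 0

-- ===== PRECONDITION & SPEC =====
def Spec_validUTF8 (data : List Int) (out : Bool) : Prop := out = validUTF8_alt data
instance (data : List Int) (out : Bool) : Decidable (Spec_validUTF8 data out) := by unfold Spec_validUTF8; infer_instance

-- ===== CLAIM =====
def Claim_equal_validUTF8 : Prop := ∀ (data : List Int), Dom_validUTF8 data → Spec_validUTF8 data (validUTF8 data)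

-- ===== LEMMAS AND PROOFS =====

-- low byte of an integer in two's complement: the Nat value of bits 7..0
def lowByte : Int → Nat
  | .ofNat n => n % 256
  | .negSucc n => 255 - n % 256

lemma lowByte_lt (b : Int) : lowByte b < 256 := by
  cases b with
  | ofNat n => exact Nat.mod_lt _ (by norm_num)
  | negSucc n => simp [lowByte]; omega

lemma nat_and_mod (k n : Nat) (hk : k < 256) : k &&& n = k &&& (n % 256) := by
  apply Nat.eq_of_testBit_eq
  intro i
  rcases lt_or_ge i 8 with h | h
  · rw [Nat.testBit_and, Nat.testBit_and, show (256 : Nat) = 2 ^ 8 from rfl,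
      Nat.testBit_mod_two_pow]
    simp [h]
  · have hk' : k.testBit i = false :=
      Nat.testBit_lt_two_pow (lt_of_lt_of_le hk (show (2:Nat)^8 ≤ 2^i from Nat.pow_le_pow_right (by norm_num) h))
    rw [Nat.testBit_and, Nat.testBit_and, hk']
    simp

set_option maxRecDepth 8192 in
lemma sub_eq_xor : ∀ x : Nat, x < 256 → 255 - x = 255 ^^^ x := by decide

lemma nat_ldiff_eq (k n : Nat) (hk : k < 256) : Nat.ldiff k n = k &&& (255 - n % 256) := by
  apply Nat.eq_of_testBit_eq
  intro i
  have hmod : n % 256 < 256 := Nat.mod_lt _ (by norm_num)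
  rw [Nat.testBit_ldiff, Nat.testBit_and, sub_eq_xor _ hmod, Nat.testBit_xor]
  rcases lt_or_ge i 8 with h | h
  · rw [show (255 : Nat) = 2 ^ 8 - 1 from rfl, Nat.testBit_two_pow_sub_one,
      show (256 : Nat) = 2 ^ 8 from rfl, Nat.testBit_mod_two_pow]
    simp [h]
  · have hk' : k.testBit i = false :=
      Nat.testBit_lt_two_pow (lt_of_lt_of_le hk (show (2:Nat)^8 ≤ 2^i from Nat.pow_le_pow_right (by norm_num) h))
    simp [hk']

lemma land_low (b : Int) (k : Nat) (hk : k < 256) :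
    Int.land ((k : Nat) : Int) b = ((k &&& lowByte b : Nat) : Int) := by
  cases b with
  | ofNat n =>
    show Int.ofNat (k &&& n) = _
    rw [nat_and_mod k n hk]; rfl
  | negSucc n =>
    show Int.ofNat (Nat.ldiff k n) = _
    rw [nat_ldiff_eq k n hk]; rfl

lemma land_low' (b : Int) (k : Nat) (hk : k < 256) :
    Int.land b ((k : Nat) : Int) = ((lowByte b &&& k : Nat) : Int) := by
  cases b with
  | ofNat n =>
    show Int.ofNat (n &&& k) = _
    rw [Nat.land_comm n k, nat_and_mod k n hk, Nat.land_comm k (n % 256)]; rfl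
  | negSucc n =>
    show Int.ofNat (Nat.ldiff k n) = _
    rw [nat_ldiff_eq k n hk, Nat.land_comm k (255 - n % 256)]; rfl

lemma pvLeadLoop_low (b : Int) :
    ∀ (fuel : Nat) (mask : Nat) (c : Int), mask < 256 →
      pvLeadLoop b fuel mask c = pvLeadLoop (Int.ofNat (lowByte b)) fuel mask c := by
  intro fuel
  induction fuel with
  | zero => intro mask c _; rfl
  | succ f ih =>
    intro mask c hm
    have h1 := land_low b mask hm
    have h2 := land_low (Int.ofNat (lowByte b)) mask hm
    have hlow : lowByte (Int.ofNat (lowByte b)) = lowByte b := by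
      show lowByte b % 256 = lowByte b
      exact Nat.mod_eq_of_lt (lowByte_lt b)
    rw [hlow] at h2
    show (if Int.land ((mask : Nat) : Int) b ≠ 0 then pvLeadLoop b f (mask >>> 1) (c + 1) else c) = _
    rw [h1]
    show _ = (if Int.land ((mask : Nat) : Int) (Int.ofNat (lowByte b)) ≠ 0
        then pvLeadLoop (Int.ofNat (lowByte b)) f (mask >>> 1) (c + 1) else c)
    rw [h2]
    have hm2 : mask >>> 1 < 256 := lt_of_le_of_lt (Nat.shiftRight_le mask 1) hm
    rw [ih (mask >>> 1) (c + 1) hm2]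

set_option maxRecDepth 8192 in
lemma and255 : ∀ x : Nat, x < 256 → x &&& 255 = x := by decide

lemma land255_eq (b : Int) : Int.land b 255 = ((lowByte b : Nat) : Int) := by
  have h := land_low' b 255 (by norm_num)
  simp only [Nat.cast_ofNat] at h
  rw [h, and255 _ (lowByte_lt b)]

-- head-byte classification of A: none = "return False", some k = continue expecting k bytes
def classA (b : Int) : Option Int :=
  let c := retrieveLeadingSetBits b
  if c = 0 then some 0 else if c = 1 ∨ 4 < c then none else some (c - 1)

lemma classA_eq (b : Int) :
    classA b =
      (if Int.land b 255 < 128 then some 0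
       else if Int.land b 255 < 192 then none
       else if Int.land b 255 < 224 then some 1
       else if Int.land b 255 < 240 then some 2
       else if Int.land b 255 < 248 then some 3
       else none) := by
  unfold classA retrieveLeadingSetBits
  rw [pvLeadLoop_low b 8 128 0 (by norm_num), land255_eq]
  have hr : lowByte b < 256 := lowByte_lt b
  generalize lowByte b = r at *
  interval_cases r <;> decide

lemma cont_eq (b : Int) :
    Int.land b 192 = 128 ↔ (Int.land b 128 ≠ 0 ∧ Int.land b 64 = 0) := by
  have h192 := land_low' b 192 (by norm_num)
  have h128 := land_low' b 128 (by norm_num)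
  have h64 := land_low' b 64 (by norm_num)
  simp only [Nat.cast_ofNat] at h192 h128 h64
  rw [h192, h128, h64]
  have hr : lowByte b < 256 := lowByte_lt b
  generalize lowByte b = r at *
  interval_cases r <;> decide

lemma goA_cons_zero (b : Int) (rest : List Int) :
    validUTF8Go (b :: rest) 0 = (classA b).elim false (fun k => validUTF8Go rest k) := by
  show (if (0 : Int) = 0 then
      let c := retrieveLeadingSetBits b
      if c = 0 then validUTF8Go rest 0
      else if c = 1 ∨ 4 < c then false
      else validUTF8Go rest (c - 1)
    else
      if ¬(Int.land b 128 ≠ 0 ∧ Int.land b 64 = 0) then false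
      else validUTF8Go rest (0 - 1)) = _
  rw [if_pos rfl]
  unfold classA
  dsimp only
  split_ifs <;> rfl

-- continuation-byte predicate as A tests it
def contA (c : Int) : Bool := decide (Int.land c 128 ≠ 0 ∧ Int.land c 64 = 0)

-- A on a run of k expected continuation bytes, k ≤ length: check the first k, then reset to 0
lemma goA_run : ∀ (k : Nat) (l : List Int), k ≤ l.length →
    validUTF8Go l (k : Int) =
      (if (l.take k).all contA then validUTF8Go (l.drop k) 0 else false) := by
  intro k
  induction k with
  | zero => intro l _; simp
  | succ k ih =>
    intro l hl
    cases l with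
    | nil => simp at hl
    | cons c l' =>
      have hne : ((k : Int) + 1) ≠ 0 := by omega
      show (if ((k : Int) + 1) = 0 then _
        else if ¬(Int.land c 128 ≠ 0 ∧ Int.land c 64 = 0) then false
        else validUTF8Go l' (((k : Int) + 1) - 1)) = _
      rw [if_neg hne]
      have harith : ((k : Int) + 1) - 1 = (k : Int) := by ring
      rw [harith]
      by_cases hc : Int.land c 128 ≠ 0 ∧ Int.land c 64 = 0
      · rw [if_neg (not_not_intro hc), ih l' (by simpa using Nat.le_of_succ_le_succ hl)]
        simp [contA, List.all_cons, hc]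
      · rw [if_pos hc]
        simp [contA, List.all_cons, hc]

-- A on a truncated run: positive expected count longer than the remaining input is always false
lemma goA_trunc : ∀ (l : List Int) (k : Int), 0 < k → l.length < k → validUTF8Go l k = false := by
  intro l
  induction l with
  | nil => intro k hk _; simp [validUTF8Go]; omega
  | cons c l' ih =>
    intro k hk hl
    have hne : k ≠ 0 := by omega
    show (if k = 0 then _
      else if ¬(Int.land c 128 ≠ 0 ∧ Int.land c 64 = 0) then false
      else validUTF8Go l' (k - 1)) = false
    rw [if_neg hne]
    by_cases hc : Int.land c 128 ≠ 0 ∧ Int.land c 64 = 0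
    · rw [if_neg (not_not_intro hc)]
      apply ih
      · simp at hl; omega
      · simp at hl; omega
    · rw [if_pos hc]

-- negation of B's any-test is A's all-test, elementwise by cont_eq
lemma any_eq_not_all (l : List Int) :
    (l.any fun c => Int.land c 192 != 128) = !(l.all contA) := by
  induction l with
  | nil => rfl
  | cons c l' ih =>
    simp only [List.any_cons, List.all_cons, ih, Bool.not_and]
    congr 1
    by_cases h : Int.land c 192 = 128
    · simp [h, contA, (cont_eq c).mp h]
    · have : ¬(Int.land c 128 ≠ 0 ∧ Int.land c 64 = 0) := fun hh => h ((cont_eq c).mpr hh)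
      simp [h, contA, this]

-- one chunk of B = classify + run of A, assembled by strong induction on the remaining length
lemma go_eq (data : List Int) :
    ∀ (m i : Nat), data.length - i ≤ m →
      validUTF8AltGo data data.length i = validUTF8Go (data.drop i) 0 := by
  intro m
  induction m with
  | zero =>
    intro i hi
    have h : ¬ i < data.length := by omega
    rw [validUTF8AltGo, dif_neg h, List.drop_of_length_le (by omega)]
    rfl
  | succ m ih =>
    intro i hi
    by_cases h : i < data.length
    · -- decompose the A side
      have hdrop : data.drop i = data[i] :: data.drop (i + 1) := List.drop_eq_getElem_cons h
      have hget : (PySem.List.pyGet? data ((i : Nat) : Int)).getD 0 = data[i] := by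
        rw [PySem.List.pyGet?_natCast, List.getElem?_eq_getElem h]; rfl
      rw [validUTF8AltGo, dif_pos h, hdrop, goA_cons_zero, classA_eq, hget]
      set b := data[i] with hb
      -- the common chunk step, one lemma application per size
      have step : ∀ size : Nat, 1 ≤ size → size ≤ 4 →
          ((if data.length < i + size then false
            else if (PySem.List.slice data (some ((i + 1 : Nat) : Int)) (some ((i + size : Nat) : Int))).any
                (fun c => Int.land c 192 != 128) then false
            else validUTF8AltGo data data.length (i + size))
           = validUTF8Go (data.drop (i + 1)) ((size : Int) - 1)) := by
        intro size h1 h4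
        have hih : data.length - (i + size) ≤ m := by omega
        have hsz : ((size : Int) - 1) = (((size - 1 : Nat) : Nat) : Int) := by omega
        by_cases htr : data.length < i + size
        · rw [if_pos htr, hsz, goA_trunc]
          · omega
          · simp; omega
        · rw [if_neg htr]
          have hslice : PySem.List.slice data (some ((i + 1 : Nat) : Int)) (some ((i + size : Nat) : Int))
              = (data.drop (i + 1)).take (size - 1) := by
            rw [PySem.List.slice_natCast]
            congr 1
            omega
          rw [hslice, any_eq_not_all, hsz,
            goA_run (size - 1) (data.drop (i + 1)) (by simp; omega)]
          by_cases hall : ((data.drop (i + 1)).take (size - 1)).all contA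
          · rw [if_pos hall]
            simp only [hall, Bool.not_true]
            rw [List.drop_drop, ih (i + size) hih,
              show i + 1 + (size - 1) = i + size by omega]
            simp
          · simp [hall]
      -- case split on the classification of the low byte of b
      by_cases c1 : Int.land b 255 < 128
      · rw [if_pos c1, if_pos c1]
        exact step 1 (by norm_num) (by norm_num)
      · rw [if_neg c1, if_neg c1]
        by_cases c2 : Int.land b 255 < 192
        · rw [if_pos c2, if_pos c2]; rfl
        · rw [if_neg c2, if_neg c2]
          by_cases c3 : Int.land b 255 < 224
          · rw [if_pos c3, if_pos c3]
            exact step 2 (by norm_num) (by norm_num)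
          · rw [if_neg c3, if_neg c3]
            by_cases c4 : Int.land b 255 < 240
            · rw [if_pos c4, if_pos c4]
              exact step 3 (by norm_num) (by norm_num)
            · rw [if_neg c4, if_neg c4]
              by_cases c5 : Int.land b 255 < 248
              · rw [if_pos c5, if_pos c5]
                exact step 4 (by norm_num) (by norm_num)
              · rw [if_neg c5, if_neg c5]; rfl
    · rw [validUTF8AltGo, dif_neg h, List.drop_of_length_le (by omega)]
      rfl

-- ===== VERDICT =====
theorem validUTF8_spec : Claim_equal_validUTF8 := by
  intro data _
  show validUTF8 data = validUTF8_alt data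
  unfold validUTF8 validUTF8_alt
  rw [go_eq data data.length 0 (by omega)]
  rfl
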